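-- pv_equiv track=rewrite | github.com/nbarker2021/Storage | cqe_unified_repository.tar_1/cqe_unified/cqe/utils.py | _generate_corner_points
-- ===== SOURCE A (Python) =====
-- from typing import Dict, List, Any, Tuple, Generator, Callable, Optional
--
-- def _generate_corner_points(dimension_sizes: List[int]) -> List[Tuple]:
--     """ Generate corner points for a multi-dimensional space. """
--     if not dimension_sizes: return []
--     corners = []
--     num_dims = len(dimension_sizes)
--     num_corners = 2 ** num_dims
--     for i in range(num_corners):
--         corner = []
--         for d in range(num_dims):
--             # Use bit masking to determine min (0) or max (size-1) for each dimension
--             if (i >> d) & 1: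
--                 corner.append(max(0, dimension_sizes[d] - 1)) # Use max index
--             else:
--                 corner.append(0) # Use min index
--         corners.append(tuple(corner))
--     return corners
-- ===== SOURCE B (Python) =====
-- from typing import List, Tuple
--
-- def _generate_corner_points(dimension_sizes: List[int]) -> List[Tuple]:
--     """ Generate corner points for a multi-dimensional space. """
--     if not dimension_sizes:
--         return []
--
--     def go(ds):
--         if not ds:
--             return [()]
--         lo, hi = 0, max(0, ds[0] - 1)
--         # dimension 0 varies fastest: for each tail corner, emit (lo,)+t then (hi,)+t
--         return [(c,) + t for t in go(ds[1:]) for c in (lo, hi)]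
--
--     return go(dimension_sizes)
-- ===== Notes on version B (the rewrite author's own statement) =====
-- stated objective: alternative
-- what changed: Replaces the 2^n-iteration bit-masking double loop with a structural recursion on the dimension list that builds each level by pairing every tail corner with the low/high choice (dimension 0 fastest, matching A's order).
import Mathlib
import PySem

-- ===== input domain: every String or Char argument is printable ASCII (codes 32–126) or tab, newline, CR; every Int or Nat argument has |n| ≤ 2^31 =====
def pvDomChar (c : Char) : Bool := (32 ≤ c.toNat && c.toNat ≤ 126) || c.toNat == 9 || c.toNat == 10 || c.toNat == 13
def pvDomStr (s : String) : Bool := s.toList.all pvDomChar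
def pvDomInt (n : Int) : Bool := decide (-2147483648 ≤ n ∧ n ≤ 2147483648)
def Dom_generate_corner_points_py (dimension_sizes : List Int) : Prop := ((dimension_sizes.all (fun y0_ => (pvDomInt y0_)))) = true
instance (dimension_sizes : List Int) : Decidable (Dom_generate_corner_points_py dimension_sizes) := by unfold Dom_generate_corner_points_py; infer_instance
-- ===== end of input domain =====

-- B replaces A's 2^n bit-masking loops by a structural recursion on the dimension list
-- (same values, same order); objective: alternative decomposition.

-- ===== PORT A =====
-- dimension_sizes[d] for d ∈ range(num_dims) is always in range, so getD is exact here.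
def generate_corner_points_py (dimension_sizes : List Int) : List (List Int) :=
  if dimension_sizes = [] then []
  else
    let num_dims := dimension_sizes.length
    let num_corners := 2 ^ num_dims
    (List.range num_corners).foldl (fun corners i =>
      corners ++ [(List.range num_dims).foldl (fun corner d =>
        if (i >>> d) &&& 1 = 1 then
          corner ++ [max 0 (dimension_sizes.getD d 0 - 1)]
        else
          corner ++ [(0 : Int)]) []]) []

-- ===== PORT B =====
def pvGoCorners : List Int → List (List Int)
  | [] => [[]]
  | s :: rest => (pvGoCorners rest).flatMap (fun t => [(0 : Int) :: t, max 0 (s - 1) :: t])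

def generate_corner_points_py_alt (dimension_sizes : List Int) : List (List Int) :=
  if dimension_sizes = [] then [] else pvGoCorners dimension_sizes

-- ===== PRECONDITION & SPEC =====
def Spec_generate_corner_points_py (dimension_sizes : List Int) (out : List (List Int)) : Prop := out = generate_corner_points_py_alt dimension_sizes
instance (dimension_sizes : List Int) (out : List (List Int)) : Decidable (Spec_generate_corner_points_py dimension_sizes out) := by unfold Spec_generate_corner_points_py; infer_instance

-- ===== CLAIM (what is proved, stated in full; the proofs are below) =====
def Claim_equal_generate_corner_points_py : Prop := ∀ (dimension_sizes : List Int), Dom_generate_corner_points_py dimension_sizes → Spec_generate_corner_points_py dimension_sizes (generate_corner_points_py dimension_sizes)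

-- ===== LEMMAS AND PROOFS =====

-- A's i-th corner, as a map over dimension indices.
def pvCorner (ds : List Int) (i : Nat) : List Int :=
  (List.range ds.length).map (fun d =>
    if (i >>> d) &&& 1 = 1 then max 0 (ds.getD d 0 - 1) else 0)

theorem pv_foldl_append_ite (g h : Nat → Int) (c : Nat → Prop) [DecidablePred c] :
    ∀ (l : List Nat) (acc : List Int),
      l.foldl (fun corner d => if c d then corner ++ [g d] else corner ++ [h d]) acc
        = acc ++ l.map (fun d => if c d then g d else h d) := by
  intro l
  induction l with
  | nil => simp
  | cons x xs ih =>
      intro acc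
      by_cases hx : c x <;> simp [hx, ih]

theorem pv_foldl_outer (f : Nat → List Int) :
    ∀ (l : List Nat) (acc : List (List Int)),
      l.foldl (fun corners i => corners ++ [f i]) acc = acc ++ l.map f := by
  intro l
  induction l with
  | nil => simp
  | cons x xs ih => intro acc; simp [ih]

theorem pv_range_two_mul : ∀ (k : Nat),
    List.range (2 * k) = (List.range k).flatMap (fun j => [2 * j, 2 * j + 1]) := by
  intro k
  induction k with
  | zero => simp
  | succ k ih =>
      have h2 : 2 * (k + 1) = (2 * k) + 1 + 1 := by ring
      rw [h2, List.range_succ, List.range_succ, List.range_succ, ih]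
      simp

theorem pv_corner_cons (s : Int) (rest : List Int) (j b : Nat) (hb : b < 2) :
    pvCorner (s :: rest) (2 * j + b)
      = (if b = 1 then max 0 (s - 1) else 0) :: pvCorner rest j := by
  unfold pvCorner
  rw [List.length_cons, List.range_succ_eq_map, List.map_cons, List.map_map]
  congr 1
  · have hm : (2 * j + b) % 2 = b := by omega
    simp [Nat.shiftRight_zero, Nat.and_one_is_mod, hm]
  · apply List.map_congr_left
    intro d _
    have hsh : (2 * j + b) >>> (d + 1) = j >>> d := by
      rw [Nat.shiftRight_eq_div_pow, Nat.shiftRight_eq_div_pow, pow_succ',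
        ← Nat.div_div_eq_div_mul]
      congr 1
      omega
    simp [Function.comp, hsh]

theorem pv_map_corner_eq_go : ∀ (ds : List Int),
    (List.range (2 ^ ds.length)).map (pvCorner ds) = pvGoCorners ds := by
  intro ds
  induction ds with
  | nil => rfl
  | cons s rest ih =>
      rw [List.length_cons, pow_succ, mul_comm, pv_range_two_mul, List.map_flatMap,
        pvGoCorners, ← ih, List.flatMap_map]
      congr 1
      funext j
      have h0 := pv_corner_cons s rest j 0 (by omega)
      have h1 := pv_corner_cons s rest j 1 (by omega)
      simp only [Nat.add_zero] at h0
      simp [h0, h1]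

-- ===== VERDICT (by name: the statement is the Claim_ definition above) =====
theorem generate_corner_points_py_spec : Claim_equal_generate_corner_points_py := by
  intro ds _
  unfold Spec_generate_corner_points_py generate_corner_points_py generate_corner_points_py_alt
  by_cases h : ds = []
  · simp [h]
  · simp only [h, if_false]
    rw [pv_foldl_outer]
    have hinner : ∀ i ∈ List.range (2 ^ ds.length),
        (List.range ds.length).foldl (fun corner d =>
          if (i >>> d) &&& 1 = 1 then corner ++ [max 0 (ds.getD d 0 - 1)]
          else corner ++ [(0 : Int)]) [] = pvCorner ds i := by
      intro i _
      rw [pv_foldl_append_ite]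
      simp [pvCorner]
    rw [List.nil_append, List.map_congr_left hinner]
    exact pv_map_corner_eq_go ds
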